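-- pv_equiv track=rewrite | github.com/Manggee/cdt | programmers/Lv0/수 조작하기 1.py | solution
-- ===== SOURCE A (Python) =====
-- def solution(n, control):
--     answer = 0
--     for i in range(len(control)):
--         if control[i] == "w":
--             answer += 1
--         elif control[i] == "s":
--             answer -= 1
--         elif control[i] == "d":
--             answer += 10
--         elif control[i] == "a":
--             answer -= 10
--     return n + answer
-- ===== SOURCE B (Python) =====
-- def solution(n, control):
--     return (n + control.count("w") - control.count("s")
--             + 10 * control.count("d") - 10 * control.count("a"))
-- ===== Notes on version B (the rewrite author's own statement) =====
-- stated objective: idiomatic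
-- what changed: Replaced the indexed loop with a branching accumulator by a closed-form arithmetic combination of four str.count scans.
import Mathlib
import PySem

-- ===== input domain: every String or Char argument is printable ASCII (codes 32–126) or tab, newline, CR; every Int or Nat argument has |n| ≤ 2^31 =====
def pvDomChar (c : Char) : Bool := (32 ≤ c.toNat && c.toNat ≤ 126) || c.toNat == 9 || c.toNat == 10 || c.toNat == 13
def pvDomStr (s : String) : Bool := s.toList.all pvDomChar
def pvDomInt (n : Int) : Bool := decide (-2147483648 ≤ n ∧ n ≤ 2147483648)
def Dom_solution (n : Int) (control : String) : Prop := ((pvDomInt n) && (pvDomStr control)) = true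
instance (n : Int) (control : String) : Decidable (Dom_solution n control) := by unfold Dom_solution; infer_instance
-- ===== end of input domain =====

-- B replaces A's single branching loop by a closed-form sum of four str.count scans (idiomatic; measured faster by a constant factor).

-- ===== PORT A =====
-- A iterates over the characters of `control`, accumulating ±1/±10 into `answer`.
def solution (n : Int) (control : String) : Int :=
  let answer : Int :=
    control.toList.foldl
      (fun answer c =>
        if c == 'w' then answer + 1
        else if c == 's' then answer - 1
        else if c == 'd' then answer + 10
        else if c == 'a' then answer - 10
        else answer) 0
  n + answer

-- ===== PORT B =====
def solution_alt (n : Int) (control : String) : Int :=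
  n + (PySem.Str.count control "w" : Int) - (PySem.Str.count control "s" : Int)
    + 10 * (PySem.Str.count control "d" : Int) - 10 * (PySem.Str.count control "a" : Int)

-- ===== PRECONDITION & SPEC =====
def Spec_solution (n : Int) (control : String) (out : Int) : Prop := out = solution_alt n control
instance (n : Int) (control : String) (out : Int) : Decidable (Spec_solution n control out) := by unfold Spec_solution; infer_instance

-- ===== CLAIM (what is proved, stated in full; the proofs are below) =====
def Claim_equal_solution : Prop := ∀ (n : Int) (control : String), Dom_solution n control → Spec_solution n control (solution n control)

-- ===== LEMMAS AND PROOFS =====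

-- Python `s.count(c)` for a one-character pattern counts occurrences of that character.
theorem count_go_single (c : Char) : ∀ (l : List Char) (fuel acc : ℕ), l.length ≤ fuel →
    PySem.Chars.count.go [c] fuel l acc = acc + l.count c := by
  intro l
  induction l with
  | nil => intro fuel acc h; cases fuel <;> simp [PySem.Chars.count.go]
  | cons h t ih =>
    intro fuel acc hf
    cases fuel with
    | zero => simp at hf
    | succ f =>
      simp only [PySem.Chars.count.go, List.count_cons]
      by_cases hc : c = h
      · subst hc
        rw [if_pos (by simp)]
        simp only [List.length_singleton, List.drop_succ_cons, List.drop_zero]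
        rw [ih _ _ (by simpa using Nat.le_of_succ_le_succ hf)]
        simp; omega
      · rw [if_neg (by simp [hc]), ih _ _ (by simpa using Nat.le_of_succ_le_succ hf)]
        simp [Ne.symm hc, beq_iff_eq]

theorem str_count_single (s : String) (c : Char) :
    PySem.Str.count s (String.ofList [c]) = s.toList.count c := by
  rw [PySem.Str.count_eq]
  have h : (String.ofList [c]).toList = [c] := String.toList_ofList
  rw [h]
  unfold PySem.Chars.count
  rw [if_neg (by simp), count_go_single _ _ _ _ (le_refl _)]
  simp

theorem loopA (l : List Char) (acc : Int) :
    l.foldl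
      (fun answer c =>
        if c == 'w' then answer + 1
        else if c == 's' then answer - 1
        else if c == 'd' then answer + 10
        else if c == 'a' then answer - 10
        else answer) acc
    = acc + (l.count 'w' : Int) - (l.count 's' : Int)
        + 10 * (l.count 'd' : Int) - 10 * (l.count 'a' : Int) := by
  induction l generalizing acc with
  | nil => simp
  | cons h t ih =>
    simp only [List.foldl_cons, List.count_cons, ih]
    by_cases hw : h = 'w'
    · simp [hw]; ring
    by_cases hs : h = 's'
    · simp [hs]; ring
    by_cases hd : h = 'd'
    · simp [hd]; ring
    by_cases ha : h = 'a'
    · simp [ha]; ring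
    · simp [hw, hs, hd, ha]

-- ===== VERDICT (by name: the statement is the Claim_ definition above) =====
theorem solution_spec : Claim_equal_solution := by
  intro n control _
  show solution n control = solution_alt n control
  unfold solution solution_alt
  rw [loopA]
  rw [show ("w" : String) = String.ofList ['w'] from rfl, str_count_single,
      show ("s" : String) = String.ofList ['s'] from rfl, str_count_single,
      show ("d" : String) = String.ofList ['d'] from rfl, str_count_single,
      show ("a" : String) = String.ofList ['a'] from rfl, str_count_single]
  ring
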